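-- pv_equiv track=rewrite | github.com/sailfishos-mirror/docutils | docutils/tools/dev/generate_punctuation_chars.py | mark_intervals
-- ===== SOURCE A (Python) =====
-- def mark_intervals(s):
--     """Return s with shortcut notation for runs of consecutive characters
--
--     Sort string and replace 'cdef' by 'c-f' and similar.
--     """
--     lst = []
--     s = sorted(ord(ch) for ch in s)
--     for n in s:
--         try:
--             if lst[-1][-1] + 1 == n:
--                 lst[-1].append(n)
--             else:
--                 lst.append([n])
--         except IndexError:
--             lst.append([n])
--
--     lst2 = []
--     for i in lst:
--         i = [chr(n) for n in i]
--         if len(i) > 2: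
--             i = i[0], '-', i[-1]
--         lst2.extend(i)
--
--     return ''.join(lst2)
-- ===== SOURCE B (Python) =====
-- def mark_intervals(s):
--     """Return s with shortcut notation for runs of consecutive characters
--
--     Sort string and replace 'cdef' by 'c-f' and similar.
--     """
--     codes = sorted(ord(ch) for ch in s)
--     n = len(codes)
--     # A run of consecutive code points keeps value-minus-position constant,
--     # so run starts are exactly the positions where that key changes.
--     cuts = [i for i in range(n) if i == 0 or codes[i] - i != codes[i - 1] - (i - 1)]
--     pieces = []
--     for a, b in zip(cuts, cuts[1:] + [n]):
--         run = codes[a:b]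
--         if len(run) > 2:
--             pieces.append(chr(run[0]) + '-' + chr(run[-1]))
--         else:
--             pieces.extend(chr(c) for c in run)
--     return ''.join(pieces)
-- ===== Notes on version B (the rewrite author's own statement) =====
-- stated objective: idiomatic
-- what changed: Instead of A's incremental construction of a list of run-lists via try/except appends followed by a second emit pass, B finds all run boundaries at once with the arithmetic value-minus-position key (constant exactly within a consecutive run), pairs adjacent boundaries with zip, and emits each run directly from a slice codes[a:b].
import Mathlib
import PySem

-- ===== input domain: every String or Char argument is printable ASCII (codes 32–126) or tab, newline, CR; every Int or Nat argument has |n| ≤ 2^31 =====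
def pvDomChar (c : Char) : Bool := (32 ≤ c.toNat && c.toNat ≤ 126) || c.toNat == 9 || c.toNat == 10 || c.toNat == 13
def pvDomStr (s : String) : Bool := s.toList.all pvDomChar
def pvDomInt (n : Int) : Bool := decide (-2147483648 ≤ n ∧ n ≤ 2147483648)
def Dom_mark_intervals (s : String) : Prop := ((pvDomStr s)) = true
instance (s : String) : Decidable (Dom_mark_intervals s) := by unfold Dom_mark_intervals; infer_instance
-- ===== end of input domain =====

-- B replaces A's incremental try/except construction of a list of run-lists by a staged
-- computation: all run boundaries at once via the value-minus-position key, then one slice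
-- per boundary pair; same cost, different algorithmic decomposition.

-- chr(n) as a character / one-char string (inputs are printable ASCII, so n is a valid code point)
def pvChrC (n : Int) : Char := Char.ofNat n.toNat
def pvChr (n : Int) : String := String.ofList [pvChrC n]

-- ===== PORT A =====
-- the try/except body: append n to the last run, or start a new run
def pushA (lst : List (List Int)) (n : Int) : List (List Int) :=
  match lst.getLast? with
  | none => lst ++ [[n]]                       -- IndexError branch
  | some run =>
      if run.getLastD 0 + 1 = n then lst.dropLast ++ [run ++ [n]]
      else lst ++ [[n]]

-- the second loop's body: pieces contributed by one run
def emitA (i : List Int) : List String :=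
  let cs := i.map pvChr
  if cs.length > 2 then [cs.headD "", "-", cs.getLastD ""] else cs

def mark_intervals (s : String) : String :=
  let codes := PySem.List.sorted (s.toList.map (fun ch => (ch.toNat : Int))) (fun x => x)
  let lst := codes.foldl pushA []
  let lst2 := lst.foldl (fun acc i => acc ++ emitA i) []
  PySem.Str.join "" lst2

-- ===== PORT B =====
-- run starts: i == 0 or codes[i] - i != codes[i-1] - (i-1)
def pvCuts (codes : List Int) : List Nat :=
  (List.range codes.length).filter (fun i =>
    i == 0 || (codes.getD i 0 - (i : Int) != codes.getD (i - 1) 0 - ((i : Int) - 1)))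

-- zip(cuts, cuts[1:] + [n])
def pvPairs (codes : List Int) : List (Nat × Nat) :=
  (pvCuts codes).zip ((pvCuts codes).drop 1 ++ [codes.length])

-- the loop body: pieces contributed by one slice codes[a:b]
def emitB (run : List Int) : List String :=
  if run.length > 2 then [String.ofList [pvChrC (run.headD 0), '-', pvChrC (run.getLastD 0)]]
  else run.map pvChr

def mark_intervals_alt (s : String) : String :=
  let codes := PySem.List.sorted (s.toList.map (fun ch => (ch.toNat : Int))) (fun x => x)
  let pieces := (pvPairs codes).foldl (fun acc ab =>
      acc ++ emitB (PySem.List.slice codes (some (ab.1 : Int)) (some (ab.2 : Int)))) []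
  PySem.Str.join "" pieces

-- ===== PRECONDITION & SPEC =====
def Spec_mark_intervals (s : String) (out : String) : Prop := out = mark_intervals_alt s
instance (s : String) (out : String) : Decidable (Spec_mark_intervals s out) := by unfold Spec_mark_intervals; infer_instance

-- ===== CLAIM (what is proved, stated in full; the proofs are below) =====
def Claim_equal_mark_intervals : Prop := ∀ (s : String), Dom_mark_intervals s → Spec_mark_intervals s (mark_intervals s)

-- ===== LEMMAS AND PROOFS =====

-- flattened character content of a list of string pieces
def pvTL (l : List String) : List Char := (l.map String.toList).flatten

theorem join_empty_eq (l : List String) : PySem.Str.join "" l = String.ofList (pvTL l) := by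
  unfold PySem.Str.join pvTL
  congr 1
  induction l with
  | nil => rfl
  | cons h t ih =>
      cases t with
      | nil => simp [PySem.Chars.join, List.intercalate]
      | cons h2 t2 =>
          simp only [PySem.Chars.join, List.intercalate] at ih ⊢
          simp only [List.map_cons, List.intersperse, List.flatten_cons] at ih ⊢
          rw [ih]
          simp

-- the run decomposition both programs compute, as a reference recursion:
-- takeRun p l = (longest prefix of l continuing the run ending at p, the rest)
def takeRun : Int → List Int → List Int × List Int
  | p, n :: rest => if p + 1 = n then ((takeRun n rest).1.cons n, (takeRun n rest).2)
                    else ([], n :: rest)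
  | _, [] => ([], [])

theorem takeRun_nil (p : Int) : takeRun p [] = ([], []) := rfl

theorem takeRun_cons (p n : Int) (rest : List Int) :
    takeRun p (n :: rest) =
      if p + 1 = n then (n :: (takeRun n rest).1, (takeRun n rest).2)
      else ([], n :: rest) := rfl

theorem getLastD_singleton' (n : Int) : ([n] : List Int).getLastD 0 = n := rfl

theorem takeRun_append : ∀ (p : Int) (l : List Int), (takeRun p l).1 ++ (takeRun p l).2 = l := by
  intro p l
  induction l generalizing p with
  | nil => rfl
  | cons n rest ih =>
      unfold takeRun
      by_cases h : p + 1 = n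
      · simp [h, List.cons_append, ih n]
      · simp [h]

theorem takeRun_snd_le (p : Int) (l : List Int) : (takeRun p l).2.length ≤ l.length := by
  conv_rhs => rw [← takeRun_append p l]
  simp

def runsOf : List Int → List (List Int)
  | [] => []
  | n :: rest => (n :: (takeRun n rest).1) :: runsOf (takeRun n rest).2
  termination_by l => l.length
  decreasing_by
    have := takeRun_snd_le n rest
    simp; omega

theorem runsOf_nil : runsOf [] = [] := by rw [runsOf]

theorem runsOf_cons (n : Int) (rest : List Int) :
    runsOf (n :: rest) = (n :: (takeRun n rest).1) :: runsOf (takeRun n rest).2 := by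
  rw [runsOf]

-- ===== A-side: the fold of pushA computes the run decomposition =====

theorem pushA_ne_nil (t : List (List Int)) (n : Int) : pushA t n ≠ [] := by
  unfold pushA
  cases h : t.getLast?
  · simp
  · dsimp only
    split_ifs <;> simp

theorem pushA_shift (ls t : List (List Int)) (n : Int) (ht : t ≠ []) :
    pushA (ls ++ t) n = ls ++ pushA t n := by
  unfold pushA
  rw [List.getLast?_append_of_ne_nil _ ht]
  cases h : t.getLast? with
  | none => simp [List.getLast?_eq_none_iff] at h; exact absurd h ht
  | some run =>
      dsimp only
      split_ifs
      · rw [List.dropLast_append_of_ne_nil ht, List.append_assoc]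
      · rw [List.append_assoc]

theorem foldl_pushA_shift (codes : List Int) (ls t : List (List Int)) (ht : t ≠ []) :
    codes.foldl pushA (ls ++ t) = ls ++ codes.foldl pushA t := by
  induction codes generalizing t with
  | nil => rfl
  | cons n rest ih =>
      simp only [List.foldl_cons, pushA_shift ls t n ht]
      exact ih _ (pushA_ne_nil t n)

theorem foldA_runs (codes : List Int) : ∀ (r : List Int), r ≠ [] →
    codes.foldl pushA [r] =
      (r ++ (takeRun (r.getLastD 0) codes).1) :: runsOf (takeRun (r.getLastD 0) codes).2 := by
  induction codes with
  | nil => intro r _; simp [takeRun_nil, runsOf_nil]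
  | cons n rest ih =>
      intro r hr
      have hA : pushA [r] n =
          if r.getLastD 0 + 1 = n then [r ++ [n]] else [r, [n]] := by
        unfold pushA
        cases r with
        | nil => exact absurd rfl hr
        | cons x xs => simp
      simp only [List.foldl_cons, hA]
      by_cases h : r.getLastD 0 + 1 = n
      · rw [if_pos h]
        have := ih (r ++ [n]) (by simp)
        rw [this]
        have hlast : (r ++ [n]).getLastD 0 = n := by simp
        rw [hlast]
        rw [takeRun_cons, if_pos h]
        simp
      · rw [if_neg h]
        have hsplit : ([r, [n]] : List (List Int)) = [r] ++ [[n]] := rfl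
        rw [hsplit, foldl_pushA_shift rest [r] [[n]] (by simp)]
        have := ih [n] (by simp)
        simp only [getLastD_singleton'] at this
        rw [this]
        rw [takeRun_cons, if_neg h]
        rw [runsOf_cons]
        simp

theorem foldA_eq_runsOf (codes : List Int) : codes.foldl pushA [] = runsOf codes := by
  cases codes with
  | nil => simp [runsOf_nil]
  | cons n rest =>
      have h0 : pushA [] n = [[n]] := rfl
      simp only [List.foldl_cons, h0]
      have := foldA_runs rest [n] (by simp)
      simp only [getLastD_singleton'] at this
      rw [this, runsOf_cons]
      simp

-- ===== B-side: cuts/zip/slice computes the same run decomposition =====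

-- the runs produced by takeRun are chains of +1 steps …
theorem takeRun_chain (p : Int) (l : List Int) :
    List.IsChain (fun a b : Int => b = a + 1) (p :: (takeRun p l).1) := by
  induction l generalizing p with
  | nil => simp [takeRun]
  | cons m rest ih =>
      rw [takeRun_cons]
      by_cases h : p + 1 = m
      · rw [if_pos h]
        have := ih m
        exact List.IsChain.cons_cons (by omega) this
      · rw [if_neg h]
        simp

-- … and the remainder does not continue the run
theorem takeRun_break (p : Int) (l : List Int) (h : (takeRun p l).2 ≠ []) :
    (takeRun p l).2.headD 0 ≠ (p :: (takeRun p l).1).getLastD 0 + 1 := by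
  induction l generalizing p with
  | nil => simp [takeRun_nil] at h
  | cons m rest ih =>
      rw [takeRun_cons] at h ⊢
      by_cases hc : p + 1 = m
      · rw [if_pos hc] at h ⊢
        have := ih m (by exact h)
        simpa using this
      · rw [if_neg hc] at h ⊢
        show m ≠ p + 1
        omega

theorem getLastD_eq_getD (l : List Int) (_ : l ≠ []) :
    l.getLastD 0 = l.getD (l.length - 1) 0 := by
  rw [List.getLastD_eq_getLast?, List.getLast?_eq_getElem?, List.getD_eq_getElem?_getD]

theorem filter_range_zero (k : Nat) (hk : 1 ≤ k) :
    (List.range k).filter (fun i => i == 0) = [0] := by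
  obtain ⟨k', rfl⟩ : ∃ k', k = 1 + k' := ⟨k - 1, by omega⟩
  rw [List.range_add, List.filter_append, List.filter_map]
  have h1 : (List.range 1).filter (fun i => i == 0) = [0] := rfl
  rw [h1]
  have h2 : (List.range k').filter ((fun i => i == 0) ∘ (fun x => 1 + x)) = [] := by
    apply List.filter_eq_nil_iff.mpr
    intro a _
    simp
  rw [h2]
  rfl

-- the cut predicate, named for the proofs
def pvPred (codes : List Int) (i : Nat) : Bool :=
  i == 0 || (codes.getD i 0 - (i : Int) != codes.getD (i - 1) 0 - ((i : Int) - 1))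

theorem pvCuts_eq (codes : List Int) :
    pvCuts codes = (List.range codes.length).filter (pvPred codes) := rfl

-- decomposition of the cut list at a maximal run boundary
theorem cuts_decomp (run t2 : List Int) (hne : run ≠ [])
    (hchain : List.IsChain (fun a b : Int => b = a + 1) run)
    (hbreak : t2 ≠ [] → t2.headD 0 ≠ run.getLastD 0 + 1) :
    pvCuts (run ++ t2) = 0 :: (pvCuts t2).map (· + run.length) := by
  have hk : 1 ≤ run.length := by
    cases run with
    | nil => exact absurd rfl hne
    | cons _ _ => simp
  rw [pvCuts_eq, pvCuts_eq, List.length_append, List.range_add, List.filter_append]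
  have hpart1 : (List.range run.length).filter (pvPred (run ++ t2)) = [0] := by
    rw [List.filter_congr (q := fun i => i == 0), filter_range_zero _ hk]
    intro i hi
    rw [List.mem_range] at hi
    cases i with
    | zero => rfl
    | succ j =>
        have hj : j < run.length := by omega
        have hgj : (run ++ t2).getD (j + 1) 0 = run.getD (j + 1) 0 :=
          List.getD_append _ _ _ _ hi
        have hgj' : (run ++ t2).getD (j + 1 - 1) 0 = run.getD j 0 := by
          simpa using List.getD_append run t2 0 j hj
        have hstep : run.getD (j + 1) 0 = run.getD j 0 + 1 := by
          have := List.isChain_iff_getElem.mp hchain j (by omega)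
          rwa [List.getD_eq_getElem _ _ hj, List.getD_eq_getElem _ _ hi]
        unfold pvPred
        rw [hgj, hgj']
        simp only [List.getD_eq_getElem?_getD] at hstep
        simp
        omega
  have hpart2 : ((List.range t2.length).map (fun x => run.length + x)).filter
      (pvPred (run ++ t2)) = ((List.range t2.length).filter (pvPred t2)).map (· + run.length) := by
    rw [List.filter_map]
    have hcong : (List.range t2.length).filter (pvPred (run ++ t2) ∘ (fun x => run.length + x)) =
        (List.range t2.length).filter (pvPred t2) := by
      apply List.filter_congr
      intro j hj
      rw [List.mem_range] at hj
      have hg1 : (run ++ t2).getD (run.length + j) 0 = t2.getD j 0 := by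
        rw [List.getD_append_right _ _ _ _ (by omega)]
        congr 1
        omega
      cases j with
      | zero =>
          have hg0 : (run ++ t2).getD (run.length + 0 - 1) 0 = run.getD (run.length - 1) 0 := by
            apply List.getD_append
            omega
          have ht2 : t2 ≠ [] := by
            intro h; rw [h] at hj; simp at hj
          have hb : t2.getD 0 0 ≠ run.getLastD 0 + 1 := by
            have := hbreak ht2
            cases t2 with
            | nil => exact absurd rfl ht2
            | cons a t => simpa using this
          unfold pvPred
          simp only [Function.comp_apply, hg1, hg0]
          have hkk : (run.length + 0 == 0) = false := by
            simp; omega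
          rw [hkk]
          have h1 : (t2.getD 0 0 - ((run.length + 0 : Nat) : Int) ≠
              run.getD (run.length - 1) 0 - (((run.length + 0 : Nat) : Int) - 1)) := by
            rw [← getLastD_eq_getD run hne]
            have hcast : ((run.length + 0 : Nat) : Int) = (run.length : Int) := by push_cast; ring
            rw [hcast]
            omega
          simp only [List.getD_eq_getElem?_getD] at h1
          push_cast at h1 ⊢
          simp
          omega
      | succ j' =>
          have hg2 : (run ++ t2).getD (run.length + (j' + 1) - 1) 0 = t2.getD j' 0 := by
            rw [show run.length + (j' + 1) - 1 = run.length + j' by omega,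
              List.getD_append_right _ _ _ _ (by omega)]
            congr 1
            omega
          unfold pvPred
          simp only [Function.comp_apply, hg1, hg2]
          have hkk : (run.length + (j' + 1) == 0) = false := by simp
          have hjj : ((j' + 1 : Nat) == 0) = false := by simp
          rw [hkk, hjj]
          have hiff : (t2.getD (j' + 1) 0 - ((run.length + (j' + 1) : Nat) : Int) ≠
                t2.getD (j' + 1 - 1) 0 - (((run.length + (j' + 1) : Nat) : Int) - 1)) ↔
              (t2.getD (j' + 1) 0 - ((j' + 1 : Nat) : Int) ≠
                t2.getD (j' + 1 - 1) 0 - (((j' + 1 : Nat) : Int) - 1)) := by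
            push_cast
            omega
          simp only [Bool.false_or]
          exact Bool.eq_iff_iff.mpr (by simpa using hiff)
    rw [hcong]
    congr 1
    funext x
    simp [Nat.add_comm]
  rw [hpart1, hpart2]
  rfl

-- slices named for the proofs
def pvSliceList (codes : List Int) : List (List Int) :=
  (pvPairs codes).map (fun ab => PySem.List.slice codes (some (ab.1 : Int)) (some (ab.2 : Int)))

theorem pvCuts_nil : pvCuts [] = [] := rfl

theorem pvSliceList_nil : pvSliceList [] = [] := rfl

theorem head_mem_cuts (n : Int) (rest : List Int) :
    ∃ c, pvCuts (n :: rest) = 0 :: c := by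
  rw [pvCuts_eq]
  have : (n :: rest).length = 1 + rest.length := by simp; omega
  rw [this, List.range_add, List.filter_append]
  have h1 : (List.range 1).filter (pvPred (n :: rest)) = [0] := by
    simp [pvPred]
  rw [h1]
  exact ⟨_, rfl⟩

theorem slices_eq_runs : ∀ (N : Nat) (codes : List Int), codes.length ≤ N →
    pvSliceList codes = runsOf codes := by
  intro N
  induction N with
  | zero =>
      intro codes hc
      have : codes = [] := by
        cases codes with
        | nil => rfl
        | cons _ _ => simp at hc
      subst this
      rw [pvSliceList_nil, runsOf_nil]
  | succ N ih =>
      intro codes hc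
      cases hcodes : codes with
      | nil => rw [pvSliceList_nil, runsOf_nil]
      | cons n rest =>
          subst hcodes
          -- the first maximal run and the remainder
          set t1 := (takeRun n rest).1 with ht1
          set t2 := (takeRun n rest).2 with ht2
          rw [runsOf_cons, ← ht1, ← ht2]
          have hsplit : (n :: t1) ++ t2 = n :: rest := by
            rw [List.cons_append, ht1, ht2, takeRun_append]
          have hlen2 : t2.length ≤ rest.length := takeRun_snd_le n rest
          have hchain : List.IsChain (fun a b : Int => b = a + 1) (n :: t1) := takeRun_chain n rest
          have hbreak : t2 ≠ [] → t2.headD 0 ≠ (n :: t1).getLastD 0 + 1 := fun h =>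
            takeRun_break n rest h
          have hcuts : pvCuts (n :: rest) = 0 :: (pvCuts t2).map (· + (n :: t1).length) := by
            rw [← hsplit]
            exact cuts_decomp (n :: t1) t2 (by simp) hchain hbreak
          set k := (n :: t1).length with hkdef
          have hk1 : 1 ≤ k := by simp [hkdef]
          have hN : (n :: rest).length = k + t2.length := by
            rw [← hsplit]; simp [hkdef]; omega
          -- slice of the head pair is the first run
          have hslice0 : ∀ b : Nat, b = k →
              PySem.List.slice (n :: rest) (some ((0 : Nat) : Int)) (some (b : Int)) = n :: t1 := by
            intro b hb
            rw [PySem.List.slice_natCast, List.drop_zero, hb, ← hsplit, hkdef]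
            exact List.take_left
          -- shifted slices are slices of t2
          have hsliceShift : ∀ a b : Nat,
              PySem.List.slice (n :: rest) (some ((a + k : Nat) : Int)) (some ((b + k : Nat) : Int)) =
                PySem.List.slice t2 (some (a : Int)) (some (b : Int)) := by
            intro a b
            rw [PySem.List.slice_natCast, PySem.List.slice_natCast, ← hsplit]
            rw [show a + k = (n :: t1).length + a by rw [hkdef]; omega,
              List.drop_length_add_append]
            congr 1
            omega
          cases ht2nil : t2 with
          | nil =>
              have hcuts' : pvCuts (n :: rest) = [0] := by
                rw [hcuts, ht2nil, pvCuts_nil]; rfl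
              unfold pvSliceList pvPairs
              rw [hcuts']
              simp only [List.drop_succ_cons, List.drop_nil, List.nil_append, List.zip_cons_cons,
                List.zip_nil_right, List.map_cons, List.map_nil]
              rw [hslice0 ((n :: rest).length) (by rw [hN, ht2nil]; simp)]
              rw [runsOf_nil]
          | cons m t2' =>
              have ht2ne : t2 ≠ [] := by rw [ht2nil]; simp
              obtain ⟨c', hc'⟩ : ∃ c', pvCuts t2 = 0 :: c' := by
                rw [ht2nil]; exact head_mem_cuts m t2'
              rw [← ht2nil]
              unfold pvSliceList pvPairs
              rw [hcuts, hc', hN]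
              simp only [List.map_cons, Nat.zero_add, List.drop_succ_cons, List.drop_zero]
              rw [List.cons_append, List.zip_cons_cons, List.map_cons]
              rw [hslice0 k rfl]
              have e1 : (k :: c'.map (· + k)) = (0 :: c').map (· + k) := by simp
              have e2 : c'.map (· + k) ++ [k + t2.length] = (c' ++ [t2.length]).map (· + k) := by
                simp [Nat.add_comm]
              rw [e1, e2, List.zip_map, List.map_map]
              have htail : (((0 :: c').zip (c' ++ [t2.length])).map
                  ((fun ab : Nat × Nat => PySem.List.slice (n :: rest) (some (ab.1 : Int)) (some (ab.2 : Int))) ∘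
                    Prod.map (· + k) (· + k))) = pvSliceList t2 := by
                unfold pvSliceList pvPairs
                rw [hc']
                simp only [List.drop_succ_cons]
                apply List.map_congr_left
                intro ab _
                simp only [Function.comp_apply, Prod.map_fst, Prod.map_snd]
                exact hsliceShift ab.1 ab.2
              rw [htail, ih t2 (by simp at hc; omega)]

-- ===== final assembly =====

theorem pvTL_flatMap (f : List Int → List String) (l : List (List Int)) :
    pvTL (l.flatMap f) = l.flatMap (fun r => pvTL (f r)) := by
  induction l with
  | nil => rfl
  | cons h t ih => simp [pvTL, List.flatMap_cons] at ih ⊢; simp [ih]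

theorem emit_eq (r : List Int) : pvTL (emitA r) = pvTL (emitB r) := by
  match r with
  | [] => rfl
  | [a] => rfl
  | [a, b] => rfl
  | a :: b :: c :: rest =>
      simp only [emitA, emitB]
      have hlen : ((a :: b :: c :: rest).map pvChr).length > 2 := by simp
      have hlen2 : (a :: b :: c :: rest).length > 2 := by simp
      have hlast : ((a :: b :: c :: rest).map pvChr).getLastD "" =
          pvChr ((a :: b :: c :: rest).getLastD 0) := by
        rw [List.getLastD_eq_getLast?, List.getLastD_eq_getLast?, List.getLast?_map]
        cases h : (a :: b :: c :: rest).getLast? with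
        | none => simp [List.getLast?_eq_none_iff] at h
        | some x => rfl
      rw [if_pos hlen, if_pos hlen2, hlast]
      have hdash : ("-" : String).toList = ['-'] := rfl
      simp [pvTL, pvChr, hdash]

-- ===== VERDICT (by name: the statement is the Claim_ definition above) =====
theorem mark_intervals_spec : Claim_equal_mark_intervals := by
  intro s _
  unfold Spec_mark_intervals mark_intervals mark_intervals_alt
  set codes := PySem.List.sorted (s.toList.map (fun ch => (ch.toNat : Int))) (fun x => x)
  rw [join_empty_eq, join_empty_eq]
  congr 1
  rw [PySem.List.foldl_append_eq_flatMap, PySem.List.foldl_append_eq_flatMap]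
  simp only [List.nil_append]
  rw [foldA_eq_runsOf]
  have hB : (pvPairs codes).flatMap
      (fun ab => emitB (PySem.List.slice codes (some (ab.1 : Int)) (some (ab.2 : Int)))) =
      (pvSliceList codes).flatMap emitB := by
    unfold pvSliceList
    rw [List.flatMap_map]
  rw [hB, slices_eq_runs codes.length codes le_rfl]
  rw [pvTL_flatMap, pvTL_flatMap]
  induction runsOf codes with
  | nil => rfl
  | cons r rs ihr => simp only [List.flatMap_cons, ihr, emit_eq r]
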